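-- pv_equiv track=rewrite | github.com/icloud-ecnu/Opara | Opara/StreamAllocator.py | get_MEG
-- ===== SOURCE A (Python) =====
-- def dfs(start, adjacency_list, visited):
--     visited[start] = True
--     for node in adjacency_list[start]:
--         if not visited[node]:
--             dfs(node, adjacency_list, visited)
--
-- def get_transitive_closure(adjacency_list):
--     transitive_closure = []
--     num_nodes = len(adjacency_list)
--     for i in range(num_nodes):
--         reachable = [False] * num_nodes
--         dfs(i, adjacency_list, reachable)
--         reachable[i] = False
--         transitive_closure.append(reachable)
--     return transitive_closure
--
-- def get_MEG(adjacency_list):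
--     transitive_closure = get_transitive_closure(adjacency_list)
--     meg = adjacency_list
--     for i in range(len(adjacency_list)):
--         meg_child_nodes = meg[i]
--         child_nodes = adjacency_list[i]
--         for child in child_nodes:
--             if child not in meg_child_nodes:
--                 continue
--             for another_child in child_nodes:
--                 if transitive_closure[child][another_child] and another_child in meg_child_nodes:
--                     meg_child_nodes.remove(another_child)
--     return meg
-- ===== SOURCE B (Python) =====
-- # Transitive closure via the iterative Warshall boolean-matrix DP instead of a recursive
-- # per-source DFS; the reduction pass is kept from the original verbatim and, like it,
-- # prunes adjacency_list in place (the returned list IS the mutated argument).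
-- def get_MEG(adjacency_list):
--     n = len(adjacency_list)
--     reach = [[False] * n for _ in range(n)]
--     for i in range(n):
--         for j in adjacency_list[i]:
--             reach[i][j] = True
--     for k in range(n):
--         for i in range(n):
--             if reach[i][k]:
--                 for j in range(n):
--                     if reach[k][j]:
--                         reach[i][j] = True
--     for i in range(n):
--         reach[i][i] = False
--     meg = adjacency_list
--     for i in range(len(adjacency_list)):
--         meg_child_nodes = meg[i]
--         child_nodes = adjacency_list[i]
--         for child in child_nodes:
--             if child not in meg_child_nodes:
--                 continue
--             for another_child in child_nodes:
--                 if reach[child][another_child] and another_child in meg_child_nodes: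
--                     meg_child_nodes.remove(another_child)
--     return meg
-- ===== Notes on version B (the rewrite author's own statement) =====
-- stated objective: alternative
-- what changed: The transitive closure is computed by an iterative Warshall boolean-matrix DP (edge-matrix init, triple k/i/j loop, then clearing the diagonal) instead of a recursive DFS launched from every node; the distinctive in-place reduction pass is kept verbatim. Pre_ excludes only adjacency lists with an edge target outside [-n, n), on which both programs raise IndexError.
import Mathlib
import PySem

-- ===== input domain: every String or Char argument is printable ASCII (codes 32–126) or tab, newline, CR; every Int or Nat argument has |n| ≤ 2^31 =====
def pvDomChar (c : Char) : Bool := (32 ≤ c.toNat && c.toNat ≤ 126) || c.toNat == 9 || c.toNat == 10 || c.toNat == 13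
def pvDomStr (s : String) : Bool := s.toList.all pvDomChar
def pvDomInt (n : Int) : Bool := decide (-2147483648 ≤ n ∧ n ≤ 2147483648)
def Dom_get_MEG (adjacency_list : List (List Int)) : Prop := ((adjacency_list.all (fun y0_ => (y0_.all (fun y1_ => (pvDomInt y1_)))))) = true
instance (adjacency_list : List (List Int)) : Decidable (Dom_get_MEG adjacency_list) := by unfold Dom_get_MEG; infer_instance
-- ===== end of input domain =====

-- B computes the transitive closure by an iterative Warshall boolean-matrix DP instead of a
-- recursive DFS from every node; the reduction pass is kept from A verbatim, and both A and B
-- prune adjacency_list in place the same way (the returned list is the mutated argument).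

-- ===== PORT A =====

-- dfs(start, adjacency_list, visited): recursion ported with fuel; fuel = len(adjacency_list)
-- is enough because every nested call marks a previously unvisited node (proved below).
def dfsA (adj : List (List Int)) : Nat → Int → List Bool → List Bool
  | 0, _, visited => visited
  | fuel+1, start, visited =>
    (PySem.List.pyGetD adj start []).foldl
      (fun vis node =>
        if PySem.List.pyGetD vis node false then vis else dfsA adj fuel node vis)
      (PySem.List.pySetD visited start true)

-- get_transitive_closure(adjacency_list)
def get_transitive_closure (adj : List (List Int)) : List (List Bool) :=
  (PySem.List.pyRange 0 (PySem.List.len adj) 1).foldl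
    (fun tc i =>
      tc ++ [PySem.List.pySetD (dfsA adj adj.length i (List.replicate adj.length false)) i false])
    []

-- inner loop 'for another_child in child_nodes: …' (index-based over the mutating row;
-- fuel = the row's length bounds the number of index steps: each step advances the
-- index and never grows the row)
def megInnerA (closure : List (List Bool)) (child : Int) : Nat → List Int → Nat → List Int
  | 0, row, _ => row
  | fuel+1, row, k =>
    if h : k < row.length then
      let another := row[k]
      if PySem.List.pyGetD (PySem.List.pyGetD closure child []) another false = true ∧ another ∈ row then
        match PySem.List.remove? row another with
        | some row' => megInnerA closure child fuel row' (k+1)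
        | none => row   -- unreachable: membership was just checked (Python: ValueError)
      else megInnerA closure child fuel row (k+1)
    else row

-- outer loop 'for child in child_nodes: …' with the 'if child not in meg_child_nodes: continue'
def megOuterA (closure : List (List Bool)) : Nat → List Int → Nat → List Int
  | 0, row, _ => row
  | fuel+1, row, j =>
    if h : j < row.length then
      let child := row[j]
      if child ∈ row then
        megOuterA closure fuel (megInnerA closure child row.length row 0) (j+1)
      else
        megOuterA closure fuel row (j+1)
    else row

def get_MEG (adjacency_list : List (List Int)) : List (List Int) :=
  (PySem.List.pyRange 0 (PySem.List.len adjacency_list) 1).foldl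
    (fun meg i =>
      PySem.List.pySetD meg i
        (megOuterA (get_transitive_closure adjacency_list)
          (PySem.List.pyGetD meg i []).length (PySem.List.pyGetD meg i []) 0))
    adjacency_list

-- ===== PORT B =====

-- reach = [[False]*n for _ in range(n)]; for i in range(n): for j in adjacency_list[i]: reach[i][j] = True
def warshallInitB (adj : List (List Int)) : List (List Bool) :=
  (PySem.List.pyRange 0 (PySem.List.len adj) 1).foldl
    (fun M i =>
      (PySem.List.pyGetD adj i []).foldl
        (fun M j => PySem.List.pySetD M i (PySem.List.pySetD (PySem.List.pyGetD M i []) j true))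
        M)
    (List.replicate adj.length (List.replicate adj.length false))

-- 'for j in range(n): if reach[k][j]: reach[i][j] = True'
def wInnerB (n : Int) (k i : Int) (M : List (List Bool)) : List (List Bool) :=
  (PySem.List.pyRange 0 n 1).foldl
    (fun M j =>
      if PySem.List.pyGetD (PySem.List.pyGetD M k []) j false then
        PySem.List.pySetD M i (PySem.List.pySetD (PySem.List.pyGetD M i []) j true)
      else M)
    M

-- 'for i in range(n): if reach[i][k]: <j-loop>'
def wRoundB (n : Int) (M : List (List Bool)) (k : Int) : List (List Bool) :=
  (PySem.List.pyRange 0 n 1).foldl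
    (fun M i =>
      if PySem.List.pyGetD (PySem.List.pyGetD M i []) k false then wInnerB n k i M else M)
    M

-- the triple k/i/j loop, then 'for i in range(n): reach[i][i] = False'
def warshallB (adj : List (List Int)) : List (List Bool) :=
  (PySem.List.pyRange 0 (PySem.List.len adj) 1).foldl
    (fun M i => PySem.List.pySetD M i (PySem.List.pySetD (PySem.List.pyGetD M i []) i false))
    ((PySem.List.pyRange 0 (PySem.List.len adj) 1).foldl
      (wRoundB (PySem.List.len adj)) (warshallInitB adj))

-- B's reduction pass is A's, verbatim: same inner loop …
def megInnerB (reach : List (List Bool)) (child : Int) : Nat → List Int → Nat → List Int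
  | 0, row, _ => row
  | fuel+1, row, k =>
    if h : k < row.length then
      let another := row[k]
      if PySem.List.pyGetD (PySem.List.pyGetD reach child []) another false = true ∧ another ∈ row then
        match PySem.List.remove? row another with
        | some row' => megInnerB reach child fuel row' (k+1)
        | none => row   -- unreachable: membership was just checked (Python: ValueError)
      else megInnerB reach child fuel row (k+1)
    else row

-- … same outer loop …
def megOuterB (reach : List (List Bool)) : Nat → List Int → Nat → List Int
  | 0, row, _ => row
  | fuel+1, row, j =>
    if h : j < row.length then
      let child := row[j]
      if child ∈ row then
        megOuterB reach fuel (megInnerB reach child row.length row 0) (j+1)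
      else
        megOuterB reach fuel row (j+1)
    else row

-- … and the same 'meg = adjacency_list; for i in range(len(adjacency_list)): …' driver.
def get_MEG_alt (adjacency_list : List (List Int)) : List (List Int) :=
  (PySem.List.pyRange 0 (PySem.List.len adjacency_list) 1).foldl
    (fun meg i =>
      PySem.List.pySetD meg i
        (megOuterB (warshallB adjacency_list)
          (PySem.List.pyGetD meg i []).length (PySem.List.pyGetD meg i []) 0))
    adjacency_list

-- ===== PRECONDITION & SPEC =====
-- Pre_ admits exactly the adjacency lists Python A returns on: every edge target a valid
-- Python list index for a length-len(adjacency_list) list (-len ≤ e < len; negative targets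
-- denote node len+e, which both programs resolve identically); outside it both A and B raise
-- IndexError.
def Pre_get_MEG (adjacency_list : List (List Int)) : Prop :=
  ∀ row ∈ adjacency_list, ∀ e ∈ row,
    -(adjacency_list.length : Int) ≤ e ∧ e < (adjacency_list.length : Int)
instance (adjacency_list : List (List Int)) : Decidable (Pre_get_MEG adjacency_list) := by
  unfold Pre_get_MEG; infer_instance

def pvWitness_get_MEG : List (List Int) := [[1, 2], [2], []]

def Spec_get_MEG (adjacency_list : List (List Int)) (out : List (List Int)) : Prop := out = get_MEG_alt adjacency_list
instance (adjacency_list : List (List Int)) (out : List (List Int)) : Decidable (Spec_get_MEG adjacency_list out) := by unfold Spec_get_MEG; infer_instance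

-- ===== CLAIM (what is proved, stated in full; the proofs are below) =====
def Claim_equal_get_MEG : Prop := ∀ (adjacency_list : List (List Int)), Dom_get_MEG adjacency_list → Pre_get_MEG adjacency_list → Spec_get_MEG adjacency_list (get_MEG adjacency_list)

-- ===== LEMMAS AND PROOFS =====

-- ---------- index and array primitives ----------

theorem pvIdx_lt {n : Nat} {x : Int} {m : Nat} (h : PySem.List.pyIdx? n x = some m) :
    m < n := by
  unfold PySem.List.pyIdx? at h
  by_cases h0 : 0 ≤ x
  · by_cases h1 : x < (n : Int)
    · simp only [if_pos h0, if_pos h1, Option.some_inj] at h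
      omega
    · simp [h0, h1] at h
  · by_cases h1 : -(n : Int) ≤ x
    · simp only [if_neg h0, if_pos h1, Option.some_inj] at h
      omega
    · simp [h0, h1] at h

theorem pvIdx_natCast {n m : Nat} (h : m < n) : PySem.List.pyIdx? n (m : Int) = some m := by
  unfold PySem.List.pyIdx?
  rw [if_pos (by omega), if_pos (by exact_mod_cast h)]
  simp

theorem pvIdx_of_range {n : Nat} {x : Int} (h0 : -(n : Int) ≤ x) (h1 : x < (n : Int)) :
    ∃ m, PySem.List.pyIdx? n x = some m := by
  unfold PySem.List.pyIdx?
  by_cases hx : 0 ≤ x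
  · exact ⟨x.toNat, by rw [if_pos hx, if_pos h1]⟩
  · exact ⟨n - (-x).toNat, by rw [if_neg hx, if_pos h0]⟩

theorem pvGetD_idx {α : Type} (v : List α) (d : α) {x : Int} {m : Nat}
    (h : PySem.List.pyIdx? v.length x = some m) :
    PySem.List.pyGetD v x d = v.getD m d := by
  unfold PySem.List.pyGetD PySem.List.pyGet?
  rw [h, Option.bind_some, List.getD_eq_getElem?_getD]

theorem pvSetD_idx {α : Type} (v : List α) (b : α) {x : Int} {m : Nat}
    (h : PySem.List.pyIdx? v.length x = some m) :
    PySem.List.pySetD v x b = v.set m b := by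
  unfold PySem.List.pySetD PySem.List.pySet?
  rw [h, Option.map_some, Option.getD_some]

theorem pvGetD_set {α : Type} (v : List α) (c m : Nat) (b d : α) (hc : c < v.length) :
    (v.set c b).getD m d = if m = c then b else v.getD m d := by
  rw [List.getD_eq_getElem?_getD, List.getD_eq_getElem?_getD, List.getElem?_set]
  by_cases h : m = c
  · subst h; simp [hc]
  · rw [if_neg (fun hh : c = m => h hh.symm), if_neg h]

-- ---------- the visited / matrix entry predicate ----------

def pvP (v : List Bool) (m : Nat) : Prop := v.getD m false = true

theorem pvP_set_true_mono {v : List Bool} {m : Nat} (k : Nat) (h : pvP v m) :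
    pvP (v.set k true) m := by
  unfold pvP at *
  rw [List.getD_eq_getElem?_getD, List.getElem?_set] at *
  by_cases hkm : k = m
  · subst hkm
    have hk : k < v.length := by
      by_contra hk
      rw [List.getElem?_eq_none (by omega)] at h
      simp at h
    simp [hk]
  · simpa [hkm] using h

theorem pvP_set_cases {v : List Bool} {k m : Nat} (h : pvP (v.set k true) m) :
    m = k ∨ pvP v m := by
  unfold pvP at *
  rw [List.getD_eq_getElem?_getD, List.getElem?_set] at h
  by_cases hkm : k = m
  · exact Or.inl hkm.symm
  · right; rw [List.getD_eq_getElem?_getD]; simpa [hkm] using h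

theorem pvP_set_self {v : List Bool} {k : Nat} (hk : k < v.length) : pvP (v.set k true) k := by
  unfold pvP
  rw [List.getD_eq_getElem?_getD, List.getElem?_set, if_pos rfl, if_pos hk]
  rfl

theorem pvP_replicate (n m : Nat) : ¬ pvP (List.replicate n false) m := by
  unfold pvP
  rw [List.getD_eq_getElem?_getD, List.getElem?_replicate]
  by_cases hm : m < n <;> simp [hm]

-- counting unvisited entries
theorem pvCnt_set (v : List Bool) (s : Nat) (hs : s < v.length) (hf : v[s] = false) :
    List.count false (v.set s true) + 1 = List.count false v := by
  induction v generalizing s with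
  | nil => simp at hs
  | cons b v ih =>
    cases s with
    | zero =>
      simp only [List.getElem_cons_zero] at hf
      subst hf
      simp
    | succ s =>
      simp only [List.set_cons_succ]
      simp only [List.count_cons]
      have := ih s (by simpa using hs) (by simpa using hf)
      omega

theorem pvCnt_mono (v w : List Bool) (hlen : w.length = v.length)
    (h : ∀ k (hk : k < v.length), v[k] = true → w[k]'(by omega) = true) :
    List.count false w ≤ List.count false v := by
  induction v generalizing w with
  | nil => cases w with | nil => simp | cons _ _ => simp at hlen
  | cons b v ih =>
    cases w with
    | nil => simp at hlen
    | cons c w =>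
      have ht := ih w (by simpa using hlen)
        (fun k hk hv => by simpa using h (k+1) (by simpa using hk) (by simpa using hv))
      simp only [List.count_cons]
      rcases b with _ | _
      · rcases c with _ | _ <;> simp <;> omega
      · have hc : c = true := by simpa using h 0 (by simp) (by simp)
        subst hc
        simp
        omega

theorem pvP_mono_cnt (v w : List Bool) (hlen : w.length = v.length)
    (h : ∀ m, pvP v m → pvP w m) :
    List.count false w ≤ List.count false v := by
  apply pvCnt_mono v w hlen
  intro k hk hv
  have := h k (by unfold pvP; rw [List.getD_eq_getElem?_getD, List.getElem?_eq_getElem hk, hv]; rfl)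
  unfold pvP at this
  rw [List.getD_eq_getElem?_getD, List.getElem?_eq_getElem (by omega)] at this
  simpa using this

-- ---------- edges on canonical node positions, bounded paths ----------

def pvE (adj : List (List Int)) (a b : Nat) : Prop :=
  ∃ e ∈ PySem.List.pyGetD adj (a : Int) [], PySem.List.pyIdx? adj.length e = some b

inductive PvPath (E : Nat → Nat → Prop) (bound : Nat) : Nat → Nat → Prop
  | single {a b : Nat} : E a b → PvPath E bound a b
  | cons {a v b : Nat} : E a v → v < bound → PvPath E bound v b → PvPath E bound a b

theorem pvPath_mono {E : Nat → Nat → Prop} {k k' a b : Nat} (hk : k ≤ k')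
    (h : PvPath E k a b) : PvPath E k' a b := by
  induction h with
  | single e => exact .single e
  | cons e h1 _ ih => exact .cons e (by omega) ih

theorem pvPath_append {E : Nat → Nat → Prop} {k a m b : Nat} (h1 : m < k)
    (p : PvPath E k a m) (q : PvPath E k m b) : PvPath E k a b := by
  induction p with
  | single e => exact .cons e h1 q
  | cons e hv1 _ ih => exact .cons e hv1 (ih h1 q)

theorem pvPath_split {E : Nat → Nat → Prop} {k a b : Nat} :
    PvPath E (k+1) a b ↔ PvPath E k a b ∨ (PvPath E k a k ∧ PvPath E k k b) := by
  constructor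
  · intro h
    induction h with
    | single e => exact Or.inl (.single e)
    | @cons a v b e hv1 _ ih =>
      by_cases hvk : v = k
      · subst hvk
        rcases ih with h | h
        · exact Or.inr ⟨.single e, h⟩
        · exact Or.inr ⟨.single e, h.2⟩
      · have hvlt : v < k := by omega
        rcases ih with h | h
        · exact Or.inl (.cons e hvlt h)
        · exact Or.inr ⟨.cons e hvlt h.1, h.2⟩
  · rintro (h | ⟨h1, h2⟩)
    · exact pvPath_mono (by omega) h
    · exact pvPath_append (by omega)
        (pvPath_mono (by omega) h1) (pvPath_mono (by omega) h2)

theorem pvPath_zero {E : Nat → Nat → Prop} {a b : Nat} (h : PvPath E 0 a b) : E a b := by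
  cases h with
  | single e => exact e
  | cons e h1 _ => omega

-- under Pre_, every entry of a real row has a canonical position
theorem pvRow_pos {adj : List (List Int)} (hpre : Pre_get_MEG adj) {c : Nat}
    (hc : c < adj.length) {e : Int} (he : e ∈ PySem.List.pyGetD adj (c : Int) []) :
    ∃ m, PySem.List.pyIdx? adj.length e = some m := by
  rw [pvGetD_idx adj [] (pvIdx_natCast hc)] at he
  have hrow : adj.getD c [] ∈ adj := by
    rw [List.getD_eq_getElem?_getD, List.getElem?_eq_getElem hc]
    exact List.getElem_mem hc
  have := hpre _ hrow e he
  exact pvIdx_of_range this.1 this.2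

theorem pvRow_eq {adj : List (List Int)} {x : Int} {m : Nat}
    (h : PySem.List.pyIdx? adj.length x = some m) :
    PySem.List.pyGetD adj x [] = PySem.List.pyGetD adj (m : Int) [] := by
  rw [pvGetD_idx adj [] h, pvGetD_idx adj [] (pvIdx_natCast (pvIdx_lt h))]

-- ---------- generic loop shapes ----------

theorem foldl_range_inv {α : Type} (P : Nat → α → Prop) (f : α → Int → α) :
    ∀ (n : Nat) (x : α), P 0 x → (∀ (k : Nat) (a : α), k < n → P k a → P (k+1) (f a (k:Int))) →
    P n ((PySem.List.pyRange 0 (n:Int) 1).foldl f x) := by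
  intro n
  induction n with
  | zero =>
    intro x h0 _
    rw [PySem.List.pyRange_one_eq_nil (by omega)]
    exact h0
  | succ n ih =>
    intro x h0 hstep
    have hr : PySem.List.pyRange 0 (((n:Nat)+1 : Nat) : Int) 1
        = PySem.List.pyRange 0 (n:Int) 1 ++ [(n:Int)] := by
      push_cast
      exact PySem.List.pyRange_one_succ_right (by omega)
    rw [hr, List.foldl_append]
    exact hstep n _ (by omega) (ih x h0 (fun k a hk ha => hstep k a (by omega) ha))

theorem fold_set_eq_map_aux {α : Type} (d : α) (g : α → α) :
    ∀ (suf pre : List α),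
      (PySem.List.pyRange (pre.length : Int) ((pre.length : Int) + (suf.length : Int)) 1).foldl
        (fun m i => PySem.List.pySetD m i (g (PySem.List.pyGetD m i d))) (pre ++ suf)
        = pre ++ suf.map g := by
  intro suf
  induction suf with
  | nil =>
    intro pre
    rw [PySem.List.pyRange_one_eq_nil (by simp)]
    simp
  | cons x suf ih =>
    intro pre
    have hb : (pre.length : Int) < (pre.length : Int) + ((x :: suf).length : Int) := by
      simp
    rw [PySem.List.pyRange_one_cons hb, List.foldl_cons]
    have h1 : PySem.List.pyGetD (pre ++ x :: suf) (pre.length : Int) d = x := by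
      rw [PySem.List.pyGetD_natCast]
      simp
    have h2 : PySem.List.pySetD (pre ++ x :: suf) (pre.length : Int) (g x) = pre ++ g x :: suf := by
      rw [PySem.List.pySetD_natCast]
      simp
    rw [h1, h2]
    have h3 : ((pre.length : Int) + 1) = (((pre ++ [g x]).length : Int)) := by simp
    have h4 : ((pre.length : Int) + ((x :: suf).length : Int))
        = ((pre ++ [g x]).length : Int) + (suf.length : Int) := by
      simp
      omega
    rw [h3, h4]
    have := ih (pre ++ [g x])
    simpa using this

theorem fold_set_eq_map {α : Type} (d : α) (g : α → α) (xs : List α) :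
    (PySem.List.pyRange 0 (PySem.List.len xs) 1).foldl
      (fun m i => PySem.List.pySetD m i (g (PySem.List.pyGetD m i d))) xs
      = xs.map g := by
  have := fold_set_eq_map_aux d g xs []
  simpa [PySem.List.len_eq] using this

-- ---------- DFS correctness (A's closure) ----------

def dfsStep (adj : List (List Int)) (F : Nat) : List Bool → Int → List Bool :=
  fun vis node => if PySem.List.pyGetD vis node false then vis else dfsA adj F node vis

theorem dfs_fold (adj : List (List Int)) (hpre : Pre_get_MEG adj) (F : Nat) {s : Nat}
    (hsn : s < adj.length) (v : List Bool)
    (ih : ∀ (start : Int) (W : List Bool) (c : Nat),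
      W.length = adj.length →
      PySem.List.pyIdx? adj.length start = some c →
      W.getD c false = false →
      List.count false W ≤ F →
      (dfsA adj F start W).length = adj.length ∧
      (∀ m, pvP W m → pvP (dfsA adj F start W) m) ∧
      pvP (dfsA adj F start W) c ∧
      (∀ a, pvP (dfsA adj F start W) a →
        pvP W a ∨ (∀ b, pvE adj a b → pvP (dfsA adj F start W) b)) ∧
      (∀ m, pvP (dfsA adj F start W) m →
        pvP W m ∨ m = c ∨ PvPath (pvE adj) adj.length c m)) :
    ∀ (l : List Int), (∀ e ∈ l, e ∈ PySem.List.pyGetD adj (s : Int) []) →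
    ∀ (W : List Bool), W.length = adj.length →
      List.count false W ≤ F →
      (∀ a, pvP W a → pvP v a ∨ a = s ∨ (∀ b, pvE adj a b → pvP W b)) →
      (∀ m, pvP W m → pvP v m ∨ m = s ∨ PvPath (pvE adj) adj.length s m) →
      (l.foldl (dfsStep adj F) W).length = adj.length ∧
      (∀ m, pvP W m → pvP (l.foldl (dfsStep adj F) W) m) ∧
      List.count false (l.foldl (dfsStep adj F) W) ≤ F ∧
      (∀ a, pvP (l.foldl (dfsStep adj F) W) a →
        pvP v a ∨ a = s ∨ (∀ b, pvE adj a b → pvP (l.foldl (dfsStep adj F) W) b)) ∧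
      (∀ m, pvP (l.foldl (dfsStep adj F) W) m →
        pvP v m ∨ m = s ∨ PvPath (pvE adj) adj.length s m) ∧
      (∀ e ∈ l, ∀ c, PySem.List.pyIdx? adj.length e = some c →
        pvP (l.foldl (dfsStep adj F) W) c) := by
  intro l
  induction l with
  | nil =>
    intro _ W h1 h2 h3 h4
    exact ⟨h1, fun m hm => hm, h2, h3, h4, by simp⟩
  | cons e l ihl =>
    intro hmem W hW1 hWcnt hW4 hW5
    have he : e ∈ PySem.List.pyGetD adj (s : Int) [] := hmem e (by simp)
    obtain ⟨c, hc⟩ := pvRow_pos hpre hsn he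
    have hcn : c < adj.length := pvIdx_lt hc
    have hgetc : PySem.List.pyGetD W e false = W.getD c false := by
      apply pvGetD_idx
      rw [hW1]
      exact hc
    rw [List.foldl_cons]
    by_cases hvis : PySem.List.pyGetD W e false = true
    · have hstep : dfsStep adj F W e = W := by
        unfold dfsStep
        rw [if_pos hvis]
      rw [hstep]
      obtain ⟨K1, K2, K3, K4, K5, K6⟩ :=
        ihl (fun e' he' => hmem e' (by simp [he'])) W hW1 hWcnt hW4 hW5
      refine ⟨K1, K2, K3, K4, K5, ?_⟩
      intro e' he' c' hc'
      rcases List.mem_cons.mp he' with heq | he''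
      · have hcc : c' = c := by
          rw [heq, hc] at hc'
          exact (Option.some_inj.mp hc').symm
        rw [hcc]
        exact K2 c (by unfold pvP; rw [← hgetc]; exact hvis)
      · exact K6 e' he'' c' hc'
    · have hstep : dfsStep adj F W e = dfsA adj F e W := by
        unfold dfsStep
        rw [if_neg hvis]
      rw [hstep]
      have hWc : W.getD c false = false := by
        rw [← hgetc]
        cases h : PySem.List.pyGetD W e false
        · rfl
        · exact absurd h hvis
      obtain ⟨D1, D2, D3, D4, D5⟩ := ih e W c hW1 hc hWc hWcnt
      have hcnt1 : List.count false (dfsA adj F e W) ≤ F :=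
        le_trans (pvP_mono_cnt W (dfsA adj F e W) (by omega) D2) hWcnt
      have hEsc : pvE adj s c := ⟨e, he, hc⟩
      have hI4 : ∀ a, pvP (dfsA adj F e W) a →
          pvP v a ∨ a = s ∨ (∀ b, pvE adj a b → pvP (dfsA adj F e W) b) := by
        intro a haW1
        rcases D4 a haW1 with h | h
        · rcases hW4 a h with h' | h' | h'
          · exact Or.inl h'
          · exact Or.inr (Or.inl h')
          · exact Or.inr (Or.inr (fun b hb => D2 b (h' b hb)))
        · exact Or.inr (Or.inr h)
      have hI5 : ∀ m, pvP (dfsA adj F e W) m →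
          pvP v m ∨ m = s ∨ PvPath (pvE adj) adj.length s m := by
        intro m hmW1
        rcases D5 m hmW1 with h | h | h
        · exact hW5 m h
        · subst h
          exact Or.inr (Or.inr (.single hEsc))
        · exact Or.inr (Or.inr (.cons hEsc hcn h))
      obtain ⟨K1, K2, K3, K4, K5, K6⟩ :=
        ihl (fun e' he' => hmem e' (by simp [he'])) (dfsA adj F e W) D1 hcnt1 hI4 hI5
      refine ⟨K1, fun m hm => K2 m (D2 m hm), K3, K4, K5, ?_⟩
      intro e' he' c' hc'
      rcases List.mem_cons.mp he' with heq | he''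
      · have hcc : c' = c := by
          rw [heq, hc] at hc'
          exact (Option.some_inj.mp hc').symm
        rw [hcc]
        exact K2 c D3
      · exact K6 e' he'' c' hc'

theorem dfs_main (adj : List (List Int)) (hpre : Pre_get_MEG adj) :
    ∀ (fuel : Nat) (start : Int) (v : List Bool) (s : Nat),
      v.length = adj.length →
      PySem.List.pyIdx? adj.length start = some s →
      v.getD s false = false →
      List.count false v ≤ fuel →
      (dfsA adj fuel start v).length = adj.length ∧
      (∀ m, pvP v m → pvP (dfsA adj fuel start v) m) ∧
      pvP (dfsA adj fuel start v) s ∧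
      (∀ a, pvP (dfsA adj fuel start v) a →
        pvP v a ∨ (∀ b, pvE adj a b → pvP (dfsA adj fuel start v) b)) ∧
      (∀ m, pvP (dfsA adj fuel start v) m →
        pvP v m ∨ m = s ∨ PvPath (pvE adj) adj.length s m) := by
  intro fuel
  induction fuel with
  | zero =>
    intro start v s hlen hidx hgd hcnt
    exfalso
    have hs : s < v.length := by
      rw [hlen]
      exact pvIdx_lt hidx
    have hvf : v[s] = false := by
      rw [List.getD_eq_getElem?_getD, List.getElem?_eq_getElem hs] at hgd
      simpa using hgd
    have hmem : false ∈ v := hvf ▸ List.getElem_mem hs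
    have := List.count_pos_iff.mpr hmem
    omega
  | succ F ih =>
    intro start v s hlen hidx hgd hcnt
    have hs : s < v.length := by
      rw [hlen]
      exact pvIdx_lt hidx
    have hsn : s < adj.length := pvIdx_lt hidx
    have hset : PySem.List.pySetD v start true = v.set s true := by
      apply pvSetD_idx
      rw [hlen]
      exact hidx
    have hrow : PySem.List.pyGetD adj start [] = PySem.List.pyGetD adj (s : Int) [] :=
      pvRow_eq hidx
    have hfold : dfsA adj (F+1) start v
        = (PySem.List.pyGetD adj (s : Int) []).foldl (dfsStep adj F) (v.set s true) := by
      rw [dfsA, hrow, hset]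
      rfl
    have hvf : v[s] = false := by
      rw [List.getD_eq_getElem?_getD, List.getElem?_eq_getElem hs] at hgd
      simpa using hgd
    have hw0len : (v.set s true).length = adj.length := by
      rw [List.length_set]
      exact hlen
    have hw0cnt : List.count false (v.set s true) ≤ F := by
      have := pvCnt_set v s hs hvf
      omega
    have hw0I4 : ∀ a, pvP (v.set s true) a →
        pvP v a ∨ a = s ∨ (∀ b, pvE adj a b → pvP (v.set s true) b) := by
      intro a ha
      rcases pvP_set_cases ha with h | h
      · exact Or.inr (Or.inl h)
      · exact Or.inl h
    have hw0I5 : ∀ m, pvP (v.set s true) m →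
        pvP v m ∨ m = s ∨ PvPath (pvE adj) adj.length s m := by
      intro m hm
      rcases pvP_set_cases hm with h | h
      · exact Or.inr (Or.inl h)
      · exact Or.inl h
    obtain ⟨K1, K2, K3, K4, K5, K6⟩ :=
      dfs_fold adj hpre F hsn v ih (PySem.List.pyGetD adj (s : Int) []) (fun _ h => h)
        (v.set s true) hw0len hw0cnt hw0I4 hw0I5
    rw [hfold]
    refine ⟨K1, fun m hm => K2 m (pvP_set_true_mono s hm), K2 s (pvP_set_self hs), ?_, K5⟩
    intro a ha
    rcases K4 a ha with h | h | h
    · exact Or.inl h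
    · subst h
      right
      intro b hb
      rcases hb with ⟨e, he, hc⟩
      exact K6 e he b hc
    · exact Or.inr h

theorem reach_marked {adj : List (List Int)} {R : List Bool} {K : Nat}
    (hclo : ∀ x, pvP R x → ∀ b, pvE adj x b → pvP R b) :
    ∀ {a m : Nat}, PvPath (pvE adj) K a m → pvP R a → pvP R m := by
  intro a m p
  induction p with
  | single e => intro ha; exact hclo _ ha _ e
  | cons e _ _ ih => intro ha; exact ih (hclo _ ha _ e)

-- characterization of one dfs row (v = all-False, fuel = n)
theorem dfs_char (adj : List (List Int)) (hpre : Pre_get_MEG adj) {i : Nat}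
    (hi : i < adj.length) :
    (dfsA adj adj.length (i : Int) (List.replicate adj.length false)).length = adj.length ∧
    ∀ m, pvP (dfsA adj adj.length (i : Int) (List.replicate adj.length false)) m ↔
      (m = i ∨ PvPath (pvE adj) adj.length i m) := by
  have hlen : (List.replicate adj.length false).length = adj.length := by simp
  have hidx := pvIdx_natCast hi
  have hgd : (List.replicate adj.length false).getD i false = false := by
    rw [List.getD_eq_getElem?_getD, List.getElem?_replicate]
    simp [hi]
  have hcnt : List.count false (List.replicate adj.length false) ≤ adj.length := by
    simp
  obtain ⟨h1, h2, h3, h4, h5⟩ :=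
    dfs_main adj hpre adj.length (i : Int) (List.replicate adj.length false) i hlen hidx hgd hcnt
  refine ⟨h1, fun m => ⟨fun hm => ?_, fun hm => ?_⟩⟩
  · rcases h5 m hm with h | h | h
    · exact absurd h (pvP_replicate _ _)
    · exact Or.inl h
    · exact Or.inr h
  · rcases hm with rfl | hp
    · exact h3
    · refine reach_marked (K := adj.length) ?_ hp h3
      intro x hx b hb
      rcases h4 x hx with h | h
      · exact absurd h (pvP_replicate _ _)
      · exact h b hb

-- ---------- matrix entries ----------

def entM (M : List (List Bool)) (a b : Nat) : Prop := (M.getD a []).getD b false = true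

def MatSh (n : Nat) (M : List (List Bool)) : Prop :=
  M.length = n ∧ ∀ a < n, (M.getD a []).length = n

theorem mat_ext {n : Nat} {M N : List (List Bool)} (hM : MatSh n M) (hN : MatSh n N)
    (h : ∀ a < n, ∀ b < n, (entM M a b ↔ entM N a b)) : M = N := by
  obtain ⟨hMl, hMr⟩ := hM
  obtain ⟨hNl, hNr⟩ := hN
  apply List.ext_getElem (by omega)
  intro a h1 h2
  have ha : a < n := by omega
  have hMrow : M.getD a [] = M[a] := by
    rw [List.getD_eq_getElem?_getD, List.getElem?_eq_getElem h1]
    rfl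
  have hNrow : N.getD a [] = N[a] := by
    rw [List.getD_eq_getElem?_getD, List.getElem?_eq_getElem h2]
    rfl
  have hMrl : M[a].length = n := by rw [← hMrow]; exact hMr a ha
  have hNrl : N[a].length = n := by rw [← hNrow]; exact hNr a ha
  apply List.ext_getElem (by omega)
  intro b hb1 hb2
  have hbn : b < n := by omega
  have hiff := h a ha b hbn
  unfold entM at hiff
  rw [hMrow, hNrow, List.getD_eq_getElem?_getD, List.getD_eq_getElem?_getD,
      List.getElem?_eq_getElem hb1, List.getElem?_eq_getElem hb2] at hiff
  simp only [Option.getD_some] at hiff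
  cases hx : M[a][b] <;> cases hy : N[a][b] <;> simp [hx, hy] at hiff ⊢

-- A-side closure characterization
def tcRow (adj : List (List Int)) (i : Nat) : List Bool :=
  PySem.List.pySetD (dfsA adj adj.length (i : Int) (List.replicate adj.length false)) (i : Int) false

theorem tc_map (adj : List (List Int)) :
    get_transitive_closure adj = (List.range adj.length).map (tcRow adj) := by
  unfold get_transitive_closure
  rw [PySem.List.len_eq]
  exact foldl_range_inv
    (fun k tc => tc = (List.range k).map (tcRow adj))
    _ adj.length [] (by simp)
    (fun k a hk ha => by
      have ha' : a = List.map (tcRow adj) (List.range k) := ha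
      show a ++ [PySem.List.pySetD (dfsA adj adj.length ((k : Nat) : Int)
          (List.replicate adj.length false)) ((k : Nat) : Int) false]
        = List.map (tcRow adj) (List.range (k + 1))
      rw [ha', List.range_succ, List.map_append]
      rfl)

theorem tc_row (adj : List (List Int)) (hpre : Pre_get_MEG adj) {a : Nat} (ha : a < adj.length) :
    (get_transitive_closure adj).getD a []
      = (dfsA adj adj.length (a : Int) (List.replicate adj.length false)).set a false := by
  rw [tc_map adj, List.getD_eq_getElem?_getD, List.getElem?_eq_getElem (by simpa using ha)]
  simp only [Option.getD_some, List.getElem_map, List.getElem_range]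
  unfold tcRow
  obtain ⟨hl, _⟩ := dfs_char adj hpre ha
  have hidx : PySem.List.pyIdx?
      (dfsA adj adj.length (a : Int) (List.replicate adj.length false)).length (a : Int)
      = some a := by
    rw [hl]
    exact pvIdx_natCast ha
  exact pvSetD_idx _ _ hidx

theorem entA_iff (adj : List (List Int)) (hpre : Pre_get_MEG adj) :
    MatSh adj.length (get_transitive_closure adj) ∧
    ∀ a < adj.length, ∀ b < adj.length,
      (entM (get_transitive_closure adj) a b ↔ (b ≠ a ∧ PvPath (pvE adj) adj.length a b)) := by
  refine ⟨⟨by rw [tc_map adj]; simp, fun a ha => ?_⟩, fun a ha b hb => ?_⟩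
  · rw [tc_row adj hpre ha]
    obtain ⟨hl, _⟩ := dfs_char adj hpre ha
    simp [hl]
  · obtain ⟨hl, hch⟩ := dfs_char adj hpre ha
    unfold entM
    rw [tc_row adj hpre ha, pvGetD_set _ a b false false (by omega)]
    by_cases hba : b = a
    · subst hba
      simp
    · rw [if_neg hba]
      constructor
      · intro h
        exact ⟨hba, ((hch b).mp h).resolve_left hba⟩
      · rintro ⟨-, hp⟩
        exact (hch b).mpr (Or.inr hp)

-- B-side closure characterization

theorem pvBool_eq {x y : Bool} (h : x = true ↔ y = true) : x = y := by
  cases x <;> cases y <;> simp_all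

theorem pvRow_set_ne {α : Type} (M : List α) (i a : Nat) (r d : α) (h : a ≠ i) :
    (M.set i r).getD a d = M.getD a d := by
  rw [List.getD_eq_getElem?_getD, List.getD_eq_getElem?_getD, List.getElem?_set,
    if_neg (fun hh => h hh.symm)]

-- the inner loop of the init pass, acting on row i only
theorem initInner (adj : List (List Int)) (i : Nat) (hi : i < adj.length) :
    ∀ (l : List Int), (∀ e ∈ l, ∃ c, PySem.List.pyIdx? adj.length e = some c) →
    ∀ (M : List (List Bool)), M.length = adj.length → (M.getD i []).length = adj.length →
      (l.foldl (fun M j => PySem.List.pySetD M (i : Int)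
          (PySem.List.pySetD (PySem.List.pyGetD M (i : Int) []) j true)) M).length = adj.length ∧
      (∀ a, a ≠ i → (l.foldl (fun M j => PySem.List.pySetD M (i : Int)
          (PySem.List.pySetD (PySem.List.pyGetD M (i : Int) []) j true)) M).getD a []
          = M.getD a []) ∧
      ((l.foldl (fun M j => PySem.List.pySetD M (i : Int)
          (PySem.List.pySetD (PySem.List.pyGetD M (i : Int) []) j true)) M).getD i []).length
          = adj.length ∧
      (∀ b, (((l.foldl (fun M j => PySem.List.pySetD M (i : Int)
          (PySem.List.pySetD (PySem.List.pyGetD M (i : Int) []) j true)) M).getD i []).getD b false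
            = true ↔
        ((M.getD i []).getD b false = true ∨
          ∃ e ∈ l, PySem.List.pyIdx? adj.length e = some b))) := by
  intro l
  induction l with
  | nil =>
    intro _ M h1 h2
    exact ⟨h1, fun a _ => rfl, h2, fun b => by simp⟩
  | cons e l ihl =>
    intro hmem M h1 h2
    obtain ⟨c, hc⟩ := hmem e (by simp)
    have hcn : c < adj.length := pvIdx_lt hc
    rw [List.foldl_cons]
    have hrow : PySem.List.pyGetD M (i : Int) [] = M.getD i [] := PySem.List.pyGetD_natCast M i []
    have hsetr : PySem.List.pySetD (M.getD i []) e true = (M.getD i []).set c true := by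
      apply pvSetD_idx
      rw [h2]
      exact hc
    have hsetM : PySem.List.pySetD M (i : Int) ((M.getD i []).set c true)
        = M.set i ((M.getD i []).set c true) := PySem.List.pySetD_natCast M i _
    rw [hrow, hsetr, hsetM]
    have hrowi : ((M.set i ((M.getD i []).set c true)).getD i []) = (M.getD i []).set c true := by
      rw [pvGetD_set M i i _ [] (by omega)]
      simp
    obtain ⟨K1, K2, K3, K4⟩ := ihl (fun e' he' => hmem e' (by simp [he']))
      (M.set i ((M.getD i []).set c true)) (by simpa using h1)
      (by rw [hrowi]; simpa using h2)
    refine ⟨K1, ?_, K3, ?_⟩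
    · intro a ha
      rw [K2 a ha, pvRow_set_ne M i a _ [] ha]
    · intro b
      rw [K4 b, hrowi, pvGetD_set _ c b true false (by omega)]
      constructor
      · rintro (h | ⟨e', he', hce'⟩)
        · by_cases hbc : b = c
          · subst hbc
            exact Or.inr ⟨e, by simp, hc⟩
          · rw [if_neg hbc] at h
            exact Or.inl h
        · exact Or.inr ⟨e', by simp [he'], hce'⟩
      · rintro (h | ⟨e', he', hce'⟩)
        · by_cases hbc : b = c
          · exact Or.inl (by rw [if_pos hbc])
          · exact Or.inl (by rw [if_neg hbc]; exact h)
        · rcases List.mem_cons.mp he' with heq | he''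
          · rw [heq, hc] at hce'
            have hbc : b = c := Option.some_inj.mp hce'.symm
            exact Or.inl (by rw [if_pos hbc])
          · exact Or.inr ⟨e', he'', hce'⟩

theorem init_char (adj : List (List Int)) (hpre : Pre_get_MEG adj) :
    MatSh adj.length (warshallInitB adj) ∧
    ∀ a < adj.length, ∀ b, (entM (warshallInitB adj) a b ↔ pvE adj a b) := by
  unfold warshallInitB
  rw [PySem.List.len_eq]
  have main := foldl_range_inv
    (fun k M => M.length = adj.length ∧
      (∀ a, k ≤ a → a < adj.length → M.getD a [] = List.replicate adj.length false) ∧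
      (∀ a < adj.length, (M.getD a []).length = adj.length) ∧
      (∀ a < k, ∀ b, ((M.getD a []).getD b false = true ↔ pvE adj a b)))
    (fun M i =>
      (PySem.List.pyGetD adj i []).foldl
        (fun M j => PySem.List.pySetD M i (PySem.List.pySetD (PySem.List.pyGetD M i []) j true))
        M)
    adj.length (List.replicate adj.length (List.replicate adj.length false))
    ⟨by simp, fun a _ ha => by
        rw [List.getD_eq_getElem?_getD, List.getElem?_replicate, if_pos ha]
        rfl,
      fun a ha => by
        rw [List.getD_eq_getElem?_getD, List.getElem?_replicate, if_pos ha]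
        simp,
      fun a ha => by omega⟩
    ?step
  case step =>
    intro k M hk hP
    obtain ⟨P1, P2, P3, P4⟩ := hP
    obtain ⟨Q1, Q2, Q3, Q4⟩ := initInner adj k hk (PySem.List.pyGetD adj (k : Int) [])
      (fun e he => pvRow_pos hpre hk he) M P1 (P3 k hk)
    refine ⟨Q1, ?_, ?_, ?_⟩
    · intro a ha han
      rw [Q2 a (by omega)]
      exact P2 a (by omega) han
    · intro a ha
      by_cases hai : a = k
      · rw [hai]
        exact Q3
      · rw [Q2 a hai]
        exact P3 a ha
    · intro a ha b
      by_cases hai : a = k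
      · subst hai
        rw [Q4 b, P2 a (by omega) hk]
        constructor
        · rintro (h | h)
          · exact absurd h (by
              rw [List.getD_eq_getElem?_getD, List.getElem?_replicate]
              by_cases hb : b < adj.length <;> simp [hb])
          · exact h
        · intro h
          exact Or.inr h
      · rw [Q2 a hai]
        exact P4 a (by omega) b
  · exact ⟨⟨main.1, main.2.2.1⟩, fun a ha b => main.2.2.2 a ha b⟩

-- the j-loop of one Warshall round
theorem wInner_char (adj : List (List Int)) (k i : Nat) (hk : k < adj.length)
    (hi : i < adj.length) (M : List (List Bool)) (hM : MatSh adj.length M) :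
    (wInnerB (adj.length : Int) (k : Int) (i : Int) M).length = adj.length ∧
    (∀ a, a ≠ i → (wInnerB (adj.length : Int) (k : Int) (i : Int) M).getD a [] = M.getD a []) ∧
    ((wInnerB (adj.length : Int) (k : Int) (i : Int) M).getD i []).length = adj.length ∧
    (∀ b < adj.length,
      (((wInnerB (adj.length : Int) (k : Int) (i : Int) M).getD i []).getD b false = true ↔
        ((M.getD i []).getD b false = true ∨ (M.getD k []).getD b false = true))) := by
  obtain ⟨hMl, hMr⟩ := hM
  unfold wInnerB
  have main := foldl_range_inv
    (fun j S => S.length = adj.length ∧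
      (∀ a, a ≠ i → S.getD a [] = M.getD a []) ∧
      ((S.getD i []).length = adj.length) ∧
      (∀ b, ((S.getD i []).getD b false = true ↔
        ((M.getD i []).getD b false = true ∨
          (b < j ∧ (M.getD k []).getD b false = true)))))
    (fun S j =>
      if PySem.List.pyGetD (PySem.List.pyGetD S (k : Int) []) j false then
        PySem.List.pySetD S (i : Int)
          (PySem.List.pySetD (PySem.List.pyGetD S (i : Int) []) j true)
      else S)
    adj.length M
    ⟨hMl, fun a _ => rfl, hMr i hi, fun b => by simp⟩
    ?step
  case step =>
    intro j S hj hP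
    obtain ⟨P1, P2, P3, P4⟩ := hP
    beta_reduce
    have hSk : (S.getD k []).getD j false = (M.getD k []).getD j false := by
      by_cases hki : k = i
      · subst hki
        apply pvBool_eq
        rw [P4 j]
        constructor
        · rintro (h | h)
          · exact h
          · omega
        · intro h
          exact Or.inl h
      · rw [P2 k hki]
    have hcond : PySem.List.pyGetD (PySem.List.pyGetD S (k : Int) []) (j : Int) false
        = (M.getD k []).getD j false := by
      rw [PySem.List.pyGetD_natCast, PySem.List.pyGetD_natCast]
      exact hSk
    by_cases hc : (M.getD k []).getD j false = true
    · rw [if_pos (by rw [hcond]; exact hc)]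
      have hrowS : PySem.List.pyGetD S (i : Int) [] = S.getD i [] := PySem.List.pyGetD_natCast S i []
      have hsetr : PySem.List.pySetD (S.getD i []) (j : Int) true = (S.getD i []).set j true :=
        PySem.List.pySetD_natCast _ j true
      have hsetS : PySem.List.pySetD S (i : Int) ((S.getD i []).set j true)
          = S.set i ((S.getD i []).set j true) := PySem.List.pySetD_natCast S i _
      rw [hrowS, hsetr, hsetS]
      have hrowi : (S.set i ((S.getD i []).set j true)).getD i [] = (S.getD i []).set j true := by
        rw [pvGetD_set S i i _ [] (by omega)]
        simp
      refine ⟨by simpa using P1, ?_, ?_, ?_⟩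
      · intro a ha
        rw [pvRow_set_ne S i a _ [] ha]
        exact P2 a ha
      · rw [hrowi]
        simpa using P3
      · intro b
        rw [hrowi, pvGetD_set _ j b true false (by omega)]
        by_cases hbj : b = j
        · subst hbj
          rw [if_pos rfl]
          constructor
          · intro _
            exact Or.inr ⟨by omega, hc⟩
          · intro _
            rfl
        · rw [if_neg hbj, P4 b]
          constructor
          · rintro (h | ⟨h1, h2⟩)
            · exact Or.inl h
            · exact Or.inr ⟨by omega, h2⟩
          · rintro (h | ⟨h1, h2⟩)
            · exact Or.inl h
            · exact Or.inr ⟨by omega, h2⟩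
    · rw [if_neg (by rw [hcond]; exact hc)]
      refine ⟨P1, P2, P3, ?_⟩
      intro b
      rw [P4 b]
      constructor
      · rintro (h | ⟨h1, h2⟩)
        · exact Or.inl h
        · exact Or.inr ⟨by omega, h2⟩
      · rintro (h | ⟨h1, h2⟩)
        · exact Or.inl h
        · have h3 : b < j ∨ b = j := by omega
          rcases h3 with h3 | h3
          · exact Or.inr ⟨h3, h2⟩
          · rw [h3] at h2
            exact absurd h2 hc
  · refine ⟨main.1, main.2.1, main.2.2.1, ?_⟩
    intro b hb
    rw [main.2.2.2 b]
    constructor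
    · rintro (h | ⟨_, h⟩)
      · exact Or.inl h
      · exact Or.inr h
    · rintro (h | h)
      · exact Or.inl h
      · exact Or.inr ⟨hb, h⟩

-- one full round
theorem wRound_char (adj : List (List Int)) (k : Nat) (hk : k < adj.length)
    (M : List (List Bool)) (hM : MatSh adj.length M) :
    MatSh adj.length (wRoundB (adj.length : Int) M (k : Int)) ∧
    (∀ a < adj.length, ∀ b < adj.length,
      (entM (wRoundB (adj.length : Int) M (k : Int)) a b ↔
        (entM M a b ∨ (entM M a k ∧ entM M k b)))) := by
  obtain ⟨hMl, hMr⟩ := hM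
  unfold wRoundB
  have main := foldl_range_inv
    (fun i S => S.length = adj.length ∧
      (∀ a < adj.length, (S.getD a []).length = adj.length) ∧
      (∀ a, i ≤ a → a < adj.length → S.getD a [] = M.getD a []) ∧
      (∀ a < i, ∀ b < adj.length, (entM S a b ↔ (entM M a b ∨ (entM M a k ∧ entM M k b)))))
    (fun S i =>
      if PySem.List.pyGetD (PySem.List.pyGetD S i []) (k : Int) false then
        wInnerB (adj.length : Int) (k : Int) i S
      else S)
    adj.length M
    ⟨hMl, hMr, fun a _ _ => rfl, fun a ha => by omega⟩
    ?step
  case step =>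
    intro i S hi hP
    obtain ⟨P1, P2, P3, P4⟩ := hP
    beta_reduce
    have hSkrow : ∀ b < adj.length, ((S.getD k []).getD b false = true ↔ entM M k b) := by
      intro b hb
      by_cases hki : i ≤ k
      · rw [P3 k hki hk]
        exact Iff.rfl
      · have h4 := P4 k (by omega) b hb
        unfold entM at h4
        rw [h4]
        constructor
        · rintro (h | ⟨_, h⟩)
          · exact h
          · exact h
        · intro h
          exact Or.inl h
    have hSirow : S.getD i [] = M.getD i [] := P3 i (by omega) hi
    have hcond : PySem.List.pyGetD (PySem.List.pyGetD S (i : Int) []) (k : Int) false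
        = (M.getD i []).getD k false := by
      rw [PySem.List.pyGetD_natCast, PySem.List.pyGetD_natCast, hSirow]
    by_cases hc : (M.getD i []).getD k false = true
    · rw [if_pos (by rw [hcond]; exact hc)]
      obtain ⟨Q1, Q2, Q3, Q4⟩ := wInner_char adj k i hk hi S ⟨P1, P2⟩
      refine ⟨Q1, ?_, ?_, ?_⟩
      · intro a ha
        by_cases hai : a = i
        · rw [hai]
          exact Q3
        · rw [Q2 a hai]
          exact P2 a ha
      · intro a ha han
        rw [Q2 a (by omega)]
        exact P3 a (by omega) han
      · intro a ha b hb
        by_cases hai : a = i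
        · subst hai
          unfold entM
          rw [Q4 b hb, hSirow]
          rw [hSkrow b hb]
          constructor
          · rintro (h | h)
            · exact Or.inl h
            · exact Or.inr ⟨hc, h⟩
          · rintro (h | ⟨_, h⟩)
            · exact Or.inl h
            · exact Or.inr h
        · unfold entM
          rw [Q2 a hai]
          exact P4 a (by omega) b hb
    · rw [if_neg (by rw [hcond]; exact hc)]
      refine ⟨P1, P2, fun a ha han => P3 a (by omega) han, ?_⟩
      intro a ha b hb
      by_cases hai : a = i
      · subst hai
        unfold entM
        rw [hSirow]
        constructor
        · intro h
          exact Or.inl h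
        · rintro (h | ⟨h1, _⟩)
          · exact h
          · exact absurd h1 hc
      · exact P4 a (by omega) b hb
  · exact ⟨⟨main.1, main.2.1⟩, fun a ha b hb => main.2.2.2 a ha b hb⟩

-- all n rounds
theorem rounds_char (adj : List (List Int)) (hpre : Pre_get_MEG adj) :
    MatSh adj.length
      ((PySem.List.pyRange 0 (adj.length : Int) 1).foldl
        (wRoundB (adj.length : Int)) (warshallInitB adj)) ∧
    ∀ a < adj.length, ∀ b < adj.length,
      (entM ((PySem.List.pyRange 0 (adj.length : Int) 1).foldl
          (wRoundB (adj.length : Int)) (warshallInitB adj)) a b ↔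
        PvPath (pvE adj) adj.length a b) := by
  obtain ⟨hI, hIe⟩ := init_char adj hpre
  have main := foldl_range_inv
    (fun k M => MatSh adj.length M ∧
      ∀ a < adj.length, ∀ b < adj.length, (entM M a b ↔ PvPath (pvE adj) k a b))
    (wRoundB (adj.length : Int))
    adj.length (warshallInitB adj)
    ⟨hI, fun a ha b hb => by
      rw [hIe a ha b]
      constructor
      · intro h
        exact .single h
      · intro h
        exact pvPath_zero h⟩
    ?step
  case step =>
    intro k M hk hP
    obtain ⟨P1, P2⟩ := hP
    obtain ⟨Q1, Q2⟩ := wRound_char adj k hk M P1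
    refine ⟨Q1, ?_⟩
    intro a ha b hb
    rw [Q2 a ha b hb, pvPath_split, P2 a ha b hb, P2 a ha k hk, P2 k hk b hb]
  · exact main

theorem entB_iff (adj : List (List Int)) (hpre : Pre_get_MEG adj) :
    MatSh adj.length (warshallB adj) ∧
    ∀ a < adj.length, ∀ b < adj.length,
      (entM (warshallB adj) a b ↔ (b ≠ a ∧ PvPath (pvE adj) adj.length a b)) := by
  obtain ⟨hR, hRe⟩ := rounds_char adj hpre
  obtain ⟨hRl, hRr⟩ := hR
  unfold warshallB
  rw [PySem.List.len_eq]
  have main := foldl_range_inv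
    (fun i S => S.length = adj.length ∧
      (∀ a < adj.length, (S.getD a []).length = adj.length) ∧
      (∀ a, i ≤ a → a < adj.length →
        S.getD a [] = ((PySem.List.pyRange 0 (adj.length : Int) 1).foldl
          (wRoundB (adj.length : Int)) (warshallInitB adj)).getD a []) ∧
      (∀ a < i, ∀ b < adj.length,
        (entM S a b ↔ (b ≠ a ∧ PvPath (pvE adj) adj.length a b))))
    (fun S i => PySem.List.pySetD S i
      (PySem.List.pySetD (PySem.List.pyGetD S i []) i false))
    adj.length
    ((PySem.List.pyRange 0 (adj.length : Int) 1).foldl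
      (wRoundB (adj.length : Int)) (warshallInitB adj))
    ⟨hRl, hRr, fun a _ _ => rfl, fun a ha => by omega⟩
    ?step
  case step =>
    intro i S hi hP
    obtain ⟨P1, P2, P3, P4⟩ := hP
    beta_reduce
    have hrowS : PySem.List.pyGetD S (i : Int) [] = S.getD i [] := PySem.List.pyGetD_natCast S i []
    have hsetr : PySem.List.pySetD (S.getD i []) (i : Int) false = (S.getD i []).set i false :=
      PySem.List.pySetD_natCast _ i false
    have hsetS : PySem.List.pySetD S (i : Int) ((S.getD i []).set i false)
        = S.set i ((S.getD i []).set i false) := PySem.List.pySetD_natCast S i _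
    rw [hrowS, hsetr, hsetS]
    have hrowlen : (S.getD i []).length = adj.length := P2 i hi
    have hrowi : (S.set i ((S.getD i []).set i false)).getD i [] = (S.getD i []).set i false := by
      rw [pvGetD_set S i i _ [] (by omega)]
      simp
    refine ⟨by simpa using P1, ?_, ?_, ?_⟩
    · intro a ha
      by_cases hai : a = i
      · rw [hai, hrowi]
        simpa using hrowlen
      · rw [pvRow_set_ne S i a _ [] hai]
        exact P2 a ha
    · intro a ha han
      rw [pvRow_set_ne S i a _ [] (by omega)]
      exact P3 a (by omega) han
    · intro a ha b hb
      by_cases hai : a = i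
      · unfold entM
        rw [hai, hrowi, pvGetD_set _ i b false false (by omega)]
        by_cases hbi : b = i
        · rw [if_pos hbi]
          simp [hbi]
        · rw [if_neg hbi, P3 i (by omega) hi]
          have hre := hRe i hi b hb
          unfold entM at hre
          rw [hre]
          exact ⟨fun h => ⟨hbi, h⟩, fun h => h.2⟩
      · unfold entM
        rw [pvRow_set_ne S i a _ [] hai]
        exact P4 a (by omega) b hb
  · exact ⟨⟨main.1, main.2.1⟩, fun a ha b hb => main.2.2.2 a ha b hb⟩

theorem closure_eq (adj : List (List Int)) (hpre : Pre_get_MEG adj) :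
    get_transitive_closure adj = warshallB adj := by
  obtain ⟨hA, hA2⟩ := entA_iff adj hpre
  obtain ⟨hB, hB2⟩ := entB_iff adj hpre
  exact mat_ext hA hB (fun a ha b hb => (hA2 a ha b hb).trans (hB2 a ha b hb).symm)

-- ---------- the shared reduction pass ----------

theorem inner_eq (closure : List (List Bool)) (child : Int) :
    ∀ fuel row k, megInnerA closure child fuel row k = megInnerB closure child fuel row k := by
  intro fuel
  induction fuel with
  | zero => intro row k; rw [megInnerA, megInnerB]
  | succ fuel ih =>
    intro row k
    rw [megInnerA, megInnerB]
    by_cases h : k < row.length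
    · rw [dif_pos h, dif_pos h]
      by_cases hc : PySem.List.pyGetD (PySem.List.pyGetD closure child []) row[k] false = true ∧ row[k] ∈ row
      · rw [if_pos hc, if_pos hc]
        cases hrem : PySem.List.remove? row row[k] with
        | some row' => exact ih row' (k+1)
        | none => rfl
      · rw [if_neg hc, if_neg hc]
        exact ih row (k+1)
    · rw [dif_neg h, dif_neg h]

theorem outer_eq (closure : List (List Bool)) :
    ∀ fuel row j, megOuterA closure fuel row j = megOuterB closure fuel row j := by
  intro fuel
  induction fuel with
  | zero => intro row j; rw [megOuterA, megOuterB]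
  | succ fuel ih =>
    intro row j
    rw [megOuterA, megOuterB]
    by_cases h : j < row.length
    · rw [dif_pos h, dif_pos h]
      by_cases hm : row[j] ∈ row
      · rw [if_pos hm, if_pos hm, inner_eq]
        exact ih _ (j+1)
      · rw [if_neg hm, if_neg hm]
        exact ih row (j+1)
    · rw [dif_neg h, dif_neg h]

theorem get_MEG_main : ∀ (adjacency_list : List (List Int)),
    Pre_get_MEG adjacency_list → get_MEG adjacency_list = get_MEG_alt adjacency_list := by
  intro adj hpre
  unfold get_MEG get_MEG_alt
  rw [fold_set_eq_map [] (fun r => megOuterA (get_transitive_closure adj) r.length r 0) adj,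
      fold_set_eq_map [] (fun r => megOuterB (warshallB adj) r.length r 0) adj]
  apply List.map_congr_left
  intro row _
  rw [closure_eq adj hpre]
  exact outer_eq (warshallB adj) row.length row 0

-- ===== VERDICT (by name: the statement is the Claim_ definition above) =====
theorem get_MEG_spec : Claim_equal_get_MEG := by
  intro adj _ hpre
  exact get_MEG_main adj hpre
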